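-- pv_equiv track=rewrite | github.com/DKU-STUDY/Algorithm | programmers/난이도별/level03.베스트앨범/sangmandu.py | solution
-- ===== SOURCE A (Python) =====
-- def solution(genres, plays):
--     rank, chart = {}, {}
--     for idx, val in enumerate(zip(genres, plays)):
--         a, b = val[0], val[1]
--         rank.setdefault(a, 0)
--         rank[a] += b
--         chart.setdefault(a, [])
--         chart[a].append((idx, b))
--     best = sorted(rank.items(), key=lambda x : x[1], reverse=True)
--     answer = []
--     for i in best:
--         answer.extend(sorted(chart[i[0]], key=lambda x : (-x[1], x[0]))[:2])
--     return [a[0] for a in answer]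
-- ===== SOURCE B (Python) =====
-- def solution(genres, plays):
--     # one pass: per genre keep (total, best(idx,plays), second or None); no per-genre lists/sorts
--     info = {}
--     for idx, (g, p) in enumerate(zip(genres, plays)):
--         e = info.get(g)
--         if e is None:
--             info[g] = (p, (idx, p), None)
--         else:
--             t, b, s = e
--             if b[1] < p:
--                 b, s = (idx, p), b
--             elif s is None or s[1] < p:
--                 s = (idx, p)
--             info[g] = (t + p, b, s)
--     order = sorted(info.items(), key=lambda kv: kv[1][0], reverse=True)
--     answer = []
--     for g, (t, b, s) in order:
--         answer.append(b[0])
--         if s is not None: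
--             answer.append(s[0])
--     return answer
-- ===== Notes on version B (the rewrite author's own statement) =====
-- stated objective: faster
-- what changed: Instead of accumulating full per-genre song lists and sorting each genre's list to pick its top two, B maintains during the single enumeration pass a per-genre record (total plays, best song, second-best song) updated on strictly greater plays, then only sorts the genre records by total and emits the stored indices.
import Mathlib
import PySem

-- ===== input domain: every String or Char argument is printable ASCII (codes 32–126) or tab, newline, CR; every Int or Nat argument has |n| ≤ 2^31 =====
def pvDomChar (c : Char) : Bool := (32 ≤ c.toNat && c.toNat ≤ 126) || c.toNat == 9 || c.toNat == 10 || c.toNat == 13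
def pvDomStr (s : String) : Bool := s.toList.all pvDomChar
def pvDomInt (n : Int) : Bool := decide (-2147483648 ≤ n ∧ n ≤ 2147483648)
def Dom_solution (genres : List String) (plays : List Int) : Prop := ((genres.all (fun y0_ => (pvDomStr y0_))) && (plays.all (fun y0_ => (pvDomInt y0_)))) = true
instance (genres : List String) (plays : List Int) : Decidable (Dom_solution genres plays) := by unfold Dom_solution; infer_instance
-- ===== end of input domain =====

-- B replaces A's per-genre accumulated lists + per-genre sorts by a single pass that maintains,
-- per genre, the total plays and the top-two songs directly (objective: faster, measured).

-- ===== PORT A =====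
def solution (genres : List String) (plays : List Int) : List Int :=
  let pairs := PySem.List.enumerate (genres.zip plays)
  let st := pairs.foldl
      (fun (st : PySem.Dict String Int × PySem.Dict String (List (Int × Int))) p =>
        ((st.1.setdefault p.2.1 0).modify p.2.1 0 (fun v => v + p.2.2),
         (st.2.setdefault p.2.1 []).modify p.2.1 [] (fun s => s ++ [(p.1, p.2.2)])))
      (PySem.Dict.empty, PySem.Dict.empty)
  let best := PySem.List.sorted st.1.items (fun x => x.2) true
  -- chart[i[0]]: the key is always present, so getD with [] is exact
  let answer := best.foldl
      (fun acc i =>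
        acc ++ (PySem.List.sorted2 (st.2.getD i.1 []) (fun x => -x.2) (fun x => x.1)).take 2) []
  answer.map (fun a => a.1)

-- ===== PORT B =====
-- info.get(g) → branch → info[g] = new value (exactly Source B's loop body)
def altVal (e : Option (Int × (Int × Int) × Option (Int × Int))) (idx p : Int) :
    Int × (Int × Int) × Option (Int × Int) :=
  match e with
  | none => (p, (idx, p), none)
  | some (t, b, s) =>
    if b.2 < p then (t + p, (idx, p), some b)
    else
      match s with
      | none => (t + p, b, some (idx, p))
      | some sv => if sv.2 < p then (t + p, b, some (idx, p)) else (t + p, b, some sv)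

def solution_alt (genres : List String) (plays : List Int) : List Int :=
  let info := (PySem.List.enumerate (genres.zip plays)).foldl
      (fun info p => info.insert p.2.1 (altVal (info.get? p.2.1) p.1 p.2.2))
      PySem.Dict.empty
  let order := PySem.List.sorted info.items (fun kv => kv.2.1) true
  order.foldl
    (fun acc kv =>
      let acc2 := acc ++ [kv.2.2.1.1]
      match kv.2.2.2 with
      | none => acc2
      | some sv => acc2 ++ [sv.1]) []

-- ===== PRECONDITION & SPEC =====
def Spec_solution (genres : List String) (plays : List Int) (out : List Int) : Prop :=
  out = solution_alt genres plays
instance (genres : List String) (plays : List Int) (out : List Int) :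
    Decidable (Spec_solution genres plays out) := by unfold Spec_solution; infer_instance

-- ===== CLAIM =====
def Claim_equal_solution : Prop :=
  ∀ (genres : List String) (plays : List Int),
    Dom_solution genres plays → Spec_solution genres plays (solution genres plays)

-- ===== LEMMAS AND PROOFS =====

-- abbreviations for the two folds (proof-side only)
def pvL (genres : List String) (plays : List Int) : List (Int × String × Int) :=
  PySem.List.enumerate (genres.zip plays)

def pvRank (l : List (Int × String × Int)) : PySem.Dict String Int :=
  l.foldl (fun d p => d.modify p.2.1 0 (fun v => v + p.2.2)) PySem.Dict.empty

def pvChart (l : List (Int × String × Int)) : PySem.Dict String (List (Int × Int)) :=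
  l.foldl (fun d p => d.modify p.2.1 [] (fun s => s ++ [(p.1, p.2.2)])) PySem.Dict.empty

def pvInfo (l : List (Int × String × Int)) :
    PySem.Dict String (Int × (Int × Int) × Option (Int × Int)) :=
  l.foldl (fun d p => d.insert p.2.1 (altVal (d.get? p.2.1) p.1 p.2.2)) PySem.Dict.empty

def pvF (l : List (Int × String × Int)) (g : String) : List (Int × String × Int) :=
  l.filter (fun p => p.2.1 == g)

def pvC (l : List (Int × String × Int)) (g : String) : List (Int × Int) :=
  (pvF l g).map (fun p => (p.1, p.2.2))

def pvVfold (m : List (Int × String × Int))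
    (o : Option (Int × (Int × Int) × Option (Int × Int))) :
    Option (Int × (Int × Int) × Option (Int × Int)) :=
  m.foldl (fun o p => some (altVal o p.1 p.2.2)) o

def pvTstep (o : Option ((Int × Int) × Option (Int × Int))) (q : Int × Int) :
    (Int × Int) × Option (Int × Int) :=
  match o with
  | none => (q, none)
  | some (b, s) =>
    if b.2 < q.2 then (q, some b)
    else
      match s with
      | none => (b, some q)
      | some sv => if sv.2 < q.2 then (b, some q) else (b, some sv)

def pvTake2 (s : List (Int × Int)) : Option ((Int × Int) × Option (Int × Int)) :=
  match s with
  | [] => none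
  | [a] => some (a, none)
  | a :: b :: _ => some (a, some b)

def pvLt2 (a b : Int × Int) : Bool :=
  decide ((-a.2) < (-b.2)) || (!decide ((-b.2) < (-a.2)) && decide (a.1 < b.1))

def pvOut (w : Int × (Int × Int) × Option (Int × Int)) : List Int :=
  w.2.1.1 :: (match w.2.2 with | none => [] | some sv => [sv.1])

def pvD0 : Int × (Int × Int) × Option (Int × Int) := (0, (0, 0), none)

lemma altVal_snd (e : Option (Int × (Int × Int) × Option (Int × Int))) (idx p : Int) :
    (altVal e idx p).2 = pvTstep (e.map (fun v => v.2)) (idx, p) := by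
  rcases e with _ | ⟨t, b, _ | sv⟩ <;> simp [altVal, pvTstep] <;> split_ifs <;> rfl

lemma altVal_fst (t : Int) (b : Int × Int) (s : Option (Int × Int)) (idx p : Int) :
    (altVal (some (t, b, s)) idx p).1 = t + p := by
  rcases s with _ | sv <;> simp [altVal] <;> split_ifs <;> rfl

lemma setdefault_modify {ν : Type} (d : PySem.Dict String ν) (k : String) (v : ν) (f : ν → ν) :
    (d.setdefault k v).modify k v f = d.modify k v f := by
  show (d.setdefault k v).insert k (f ((d.setdefault k v).getD k v)) = d.insert k (f (d.getD k v))
  rw [PySem.Dict.getD_setdefault_self]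
  by_cases hc : d.contains k = true
  · rw [PySem.Dict.setdefault_of_contains d v hc]
  · rw [PySem.Dict.setdefault_of_not_contains d v (by simpa using hc),
      PySem.Dict.insert_insert_self]

lemma pvLt2_of_fst_lt (x y : Int × Int) (h : y.1 < x.1) : pvLt2 x y = decide (y.2 < x.2) := by
  simp [pvLt2]
  omega

lemma ins2 (x : Int × Int) (acc : List (Int × Int)) (h : ∀ y ∈ acc, y.1 < x.1) :
    pvTake2 (PySem.List.insertBy pvLt2 x acc) = some (pvTstep (pvTake2 acc) x) := by
  match acc with
  | [] => rfl
  | a :: rest =>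
    rw [PySem.List.insertBy]
    rw [pvLt2_of_fst_lt x a (h a (by simp))]
    match rest with
    | [] =>
      by_cases h1 : a.2 < x.2
      · simp [h1, pvTake2, pvTstep]
      · simp [h1, PySem.List.insertBy, pvTake2, pvTstep]
    | r :: rr =>
      by_cases h1 : a.2 < x.2
      · simp [h1, pvTake2, pvTstep]
      · have hif : (decide (a.2 < x.2)) = false := by simp [h1]
        rw [hif]
        simp only [Bool.false_eq_true, if_false]
        rw [PySem.List.insertBy]
        rw [pvLt2_of_fst_lt x r (h r (by simp))]
        by_cases h2 : r.2 < x.2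
        · simp [h2, pvTake2, pvTstep, h1]
        · simp [h2, pvTake2, pvTstep, h1]

lemma fold2 (c : List (Int × Int)) : ∀ acc : List (Int × Int),
    (∀ y ∈ acc, ∀ x ∈ c, y.1 < x.1) → c.Pairwise (fun a b => a.1 < b.1) →
    pvTake2 (c.foldl (fun acc x => PySem.List.insertBy pvLt2 x acc) acc)
      = c.foldl (fun o x => some (pvTstep o x)) (pvTake2 acc) := by
  induction c with
  | nil => intro acc _ _; rfl
  | cons x rest ih =>
    intro acc hacc hpw
    simp only [List.foldl_cons]
    rw [← ins2 x acc (fun y hy => hacc y hy x (by simp))]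
    exact ih _ (fun y hy z hz => by
      rcases (PySem.List.mem_insertBy pvLt2 x y acc).mp hy with rfl | hy'
      · exact (List.pairwise_cons.mp hpw).1 z hz
      · exact hacc y hy' z (by simp [hz])) (List.pairwise_cons.mp hpw).2

lemma take2_map (s : List (Int × Int)) :
    (s.take 2).map (fun a => a.1)
      = (match pvTake2 s with
         | none => []
         | some (b, none) => [b.1]
         | some (b, some sv) => [b.1, sv.1]) := by
  match s with
  | [] => rfl
  | [a] => rfl
  | a :: b :: t => rfl

lemma get?_pvVfold (l : List (Int × String × Int)) :
    ∀ (d : PySem.Dict String (Int × (Int × Int) × Option (Int × Int))) (g : String),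
    (l.foldl (fun d p => d.insert p.2.1 (altVal (d.get? p.2.1) p.1 p.2.2)) d).get? g
      = pvVfold (pvF l g) (d.get? g) := by
  induction l with
  | nil => intro d g; rfl
  | cons p rest ih =>
    intro d g
    simp only [List.foldl_cons, pvF, List.filter_cons]
    by_cases hg : p.2.1 = g
    · simp only [hg, beq_self_eq_true]
      rw [ih]
      simp [pvVfold, pvF, PySem.Dict.get?_insert_self]
    · have hne : (p.2.1 == g) = false := by simp [hg]
      simp only [hne, Bool.false_eq_true, if_false]
      rw [ih]
      rw [PySem.Dict.get?_insert_of_ne d _ (fun h => hg h.symm)]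
      simp [pvF]

lemma getD_pvRankFold (l : List (Int × String × Int)) :
    ∀ (d : PySem.Dict String Int) (g : String),
    (l.foldl (fun d p => d.modify p.2.1 0 (fun v => v + p.2.2)) d).getD g 0
      = d.getD g 0 + ((pvF l g).map (fun p => p.2.2)).sum := by
  induction l with
  | nil => intro d g; simp [pvF]
  | cons p rest ih =>
    intro d g
    simp only [List.foldl_cons]
    rw [ih]
    by_cases hg : p.2.1 = g
    · subst hg
      rw [show (d.modify p.2.1 0 (fun v => v + p.2.2)) = d.insert p.2.1 (d.getD p.2.1 0 + p.2.2) from rfl,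
        PySem.Dict.getD_insert_self]
      simp [pvF]
      ring
    · rw [show (d.modify p.2.1 0 (fun v => v + p.2.2)) = d.insert p.2.1 (d.getD p.2.1 0 + p.2.2) from rfl,
        PySem.Dict.getD_insert_of_ne d _ _ (fun h => hg h.symm)]
      simp [pvF, show (p.2.1 == g) = false by simp [hg]]

lemma getD_pvChartFold (l : List (Int × String × Int)) :
    ∀ (d : PySem.Dict String (List (Int × Int))) (g : String),
    (l.foldl (fun d p => d.modify p.2.1 [] (fun s => s ++ [(p.1, p.2.2)])) d).getD g []
      = d.getD g [] ++ pvC l g := by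
  induction l with
  | nil => intro d g; simp [pvC, pvF]
  | cons p rest ih =>
    intro d g
    simp only [List.foldl_cons]
    rw [ih]
    by_cases hg : p.2.1 = g
    · subst hg
      rw [show (d.modify p.2.1 [] (fun s => s ++ [(p.1, p.2.2)]))
            = d.insert p.2.1 (d.getD p.2.1 [] ++ [(p.1, p.2.2)]) from rfl,
        PySem.Dict.getD_insert_self]
      simp [pvC, pvF]
    · rw [show (d.modify p.2.1 [] (fun s => s ++ [(p.1, p.2.2)]))
            = d.insert p.2.1 (d.getD p.2.1 [] ++ [(p.1, p.2.2)]) from rfl,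
        PySem.Dict.getD_insert_of_ne d _ _ (fun h => hg h.symm)]
      simp [pvC, pvF, show (p.2.1 == g) = false by simp [hg]]

lemma vfold_snd (m : List (Int × String × Int)) :
    ∀ o, (pvVfold m o).map (fun v => v.2)
      = (m.map (fun p => (p.1, p.2.2))).foldl (fun o q => some (pvTstep o q))
          (o.map (fun v => v.2)) := by
  induction m with
  | nil => intro o; rfl
  | cons p rest ih =>
    intro o
    simp only [pvVfold, List.foldl_cons, List.map_cons]
    rw [show (rest.foldl (fun o p => some (altVal o p.1 p.2.2)) (some (altVal o p.1 p.2.2)))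
        = pvVfold rest (some (altVal o p.1 p.2.2)) from rfl, ih]
    simp [altVal_snd]

lemma vfold_some (m : List (Int × String × Int)) :
    ∀ v0, ∃ w, pvVfold m (some v0) = some w ∧ w.1 = v0.1 + (m.map (fun p => p.2.2)).sum := by
  induction m with
  | nil => intro v0; exact ⟨v0, rfl, by simp⟩
  | cons p rest ih =>
    intro v0
    obtain ⟨w, hw, hw1⟩ := ih (altVal (some v0) p.1 p.2.2)
    refine ⟨w, hw, ?_⟩
    obtain ⟨t, b, s⟩ := v0
    rw [hw1, altVal_fst]
    simp
    ring

lemma vfold_ne_nil (m : List (Int × String × Int)) (h : m ≠ []) :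
    ∃ w, pvVfold m none = some w ∧ w.1 = (m.map (fun p => p.2.2)).sum := by
  match m with
  | p :: rest =>
    obtain ⟨w, hw, hw1⟩ := vfold_some rest (altVal none p.1 p.2.2)
    exact ⟨w, hw, by rw [hw1]; simp [altVal]⟩

lemma insertBy_map {α β : Type} (F : α → β) (bf : β → β → Bool) (bf' : α → α → Bool)
    (h : ∀ a b, bf (F a) (F b) = bf' a b) (x : α) (acc : List α) :
    PySem.List.insertBy bf (F x) (acc.map F) = (PySem.List.insertBy bf' x acc).map F := by
  induction acc with
  | nil => rfl
  | cons a rest ih =>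
    simp only [List.map_cons]
    rw [PySem.List.insertBy, PySem.List.insertBy, h]
    by_cases hb : bf' x a = true
    · simp [hb]
    · rw [if_neg hb, if_neg hb]; rw [List.map_cons, ih]

lemma foldl_insertBy_map {α β : Type} (F : α → β) (bf : β → β → Bool) (bf' : α → α → Bool)
    (h : ∀ a b, bf (F a) (F b) = bf' a b) (K : List α) :
    ∀ acc : List α,
    K.foldl (fun a k => PySem.List.insertBy bf (F k) a) (acc.map F)
      = (K.foldl (fun a k => PySem.List.insertBy bf' k a) acc).map F := by
  induction K with
  | nil => intro acc; rfl
  | cons k rest ih =>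
    intro acc
    simp only [List.foldl_cons]
    rw [insertBy_map F bf bf' h k acc, ih]

lemma sorted_rev_map {α β κ : Type} [LinearOrder κ] (F : α → β) (key : β → κ) (K : List α) :
    PySem.List.sorted (K.map F) key true
      = (PySem.List.sorted K (fun k => key (F k)) true).map F := by
  rw [PySem.List.sorted_rev_eq_foldl_insertBy, PySem.List.sorted_rev_eq_foldl_insertBy,
    List.foldl_map]
  exact foldl_insertBy_map F _ _ (fun a b => rfl) K []

lemma per_genre (m : List (Int × String × Int)) (_hne : m ≠ [])
    (hpw : (m.map (fun p => (p.1, p.2.2))).Pairwise (fun a b => a.1 < b.1))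
    (w : Int × (Int × Int) × Option (Int × Int)) (hw : pvVfold m none = some w) :
    ((PySem.List.sorted2 (m.map (fun p => (p.1, p.2.2)))
        (fun x => -x.2) (fun x => x.1)).take 2).map (fun a => a.1) = pvOut w := by
  have hs : PySem.List.sorted2 (m.map (fun p => (p.1, p.2.2)))
      (fun x => -x.2) (fun x => x.1)
      = (m.map (fun p => (p.1, p.2.2))).foldl
          (fun acc x => PySem.List.insertBy pvLt2 x acc) [] := rfl
  have h2 : pvTake2 ((m.map (fun p => (p.1, p.2.2))).foldl
        (fun acc x => PySem.List.insertBy pvLt2 x acc) []) = some w.2 := by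
    rw [fold2 _ [] (by simp) hpw]
    have := vfold_snd m none
    rw [hw] at this
    simpa using this.symm
  rw [take2_map, hs, h2]
  obtain ⟨t, b, _ | sv⟩ := w <;> rfl

lemma mem_update_nil {g : String} {xs : List String} :
    g ∈ PySem.Set.update [] xs ↔ g ∈ xs := by simp [pysem]

lemma pvSplit (l : List (Int × String × Int)) :
    ∀ (a : PySem.Dict String Int) (b : PySem.Dict String (List (Int × Int))),
    l.foldl
        (fun (st : PySem.Dict String Int × PySem.Dict String (List (Int × Int))) p =>
          ((st.1.setdefault p.2.1 0).modify p.2.1 0 (fun v => v + p.2.2),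
           (st.2.setdefault p.2.1 []).modify p.2.1 [] (fun s => s ++ [(p.1, p.2.2)])))
        (a, b)
      = (l.foldl (fun d p => (d.setdefault p.2.1 0).modify p.2.1 0 (fun v => v + p.2.2)) a,
         l.foldl (fun d p => (d.setdefault p.2.1 []).modify p.2.1 [] (fun s => s ++ [(p.1, p.2.2)])) b) := by
  induction l with
  | nil => intro a b; rfl
  | cons p rest ih => intro a b; simp only [List.foldl_cons]; exact ih _ _

lemma solution_eq (genres : List String) (plays : List Int) :
    solution genres plays
      = ((PySem.List.sorted (pvRank (pvL genres plays)).items (fun x => x.2) true).foldl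
          (fun acc i =>
            acc ++ (PySem.List.sorted2 ((pvChart (pvL genres plays)).getD i.1 [])
              (fun x => -x.2) (fun x => x.1)).take 2) []).map (fun a => a.1) := by
  show ((PySem.List.sorted
      ((pvL genres plays).foldl
        (fun (st : PySem.Dict String Int × PySem.Dict String (List (Int × Int))) p =>
          ((st.1.setdefault p.2.1 0).modify p.2.1 0 (fun v => v + p.2.2),
           (st.2.setdefault p.2.1 []).modify p.2.1 [] (fun s => s ++ [(p.1, p.2.2)])))
        (PySem.Dict.empty, PySem.Dict.empty)).1.items (fun x => x.2) true).foldl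
      (fun acc i =>
        acc ++ (PySem.List.sorted2
          (((pvL genres plays).foldl
            (fun (st : PySem.Dict String Int × PySem.Dict String (List (Int × Int))) p =>
              ((st.1.setdefault p.2.1 0).modify p.2.1 0 (fun v => v + p.2.2),
               (st.2.setdefault p.2.1 []).modify p.2.1 [] (fun s => s ++ [(p.1, p.2.2)])))
            (PySem.Dict.empty, PySem.Dict.empty)).2.getD i.1 [])
          (fun x => -x.2) (fun x => x.1)).take 2) []).map (fun a => a.1) = _
  rw [pvSplit]
  rw [show (fun (d : PySem.Dict String Int) (p : Int × String × Int) =>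
        (d.setdefault p.2.1 0).modify p.2.1 0 (fun v => v + p.2.2))
      = (fun (d : PySem.Dict String Int) (p : Int × String × Int) =>
        d.modify p.2.1 0 (fun v => v + p.2.2)) from
    funext fun d => funext fun p => setdefault_modify d p.2.1 0 _]
  rw [show (fun (d : PySem.Dict String (List (Int × Int))) (p : Int × String × Int) =>
        (d.setdefault p.2.1 []).modify p.2.1 [] (fun s => s ++ [(p.1, p.2.2)]))
      = (fun (d : PySem.Dict String (List (Int × Int))) (p : Int × String × Int) =>
        d.modify p.2.1 [] (fun s => s ++ [(p.1, p.2.2)])) from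
    funext fun d => funext fun p => setdefault_modify d p.2.1 [] _]
  rfl

lemma solution_alt_eq (genres : List String) (plays : List Int) :
    solution_alt genres plays
      = (PySem.List.sorted (pvInfo (pvL genres plays)).items (fun kv => kv.2.1) true).foldl
          (fun acc kv => acc ++ pvOut kv.2) [] := by
  unfold solution_alt pvInfo pvL
  rw [show (fun (acc : List Int) (kv : String × Int × (Int × Int) × Option (Int × Int)) =>
        let acc2 := acc ++ [kv.2.2.1.1]
        match kv.2.2.2 with
        | none => acc2
        | some sv => acc2 ++ [sv.1])
      = (fun (acc : List Int) (kv : String × Int × (Int × Int) × Option (Int × Int)) =>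
        acc ++ pvOut kv.2) from
    funext fun acc => funext fun kv => by
      rcases kv with ⟨g, t, b, _ | sv⟩ <;> simp [pvOut]]

lemma main_eq (l : List (Int × String × Int)) (hpl : l.Pairwise (fun p q => p.1 < q.1)) :
    ((PySem.List.sorted (pvRank l).items (fun x => x.2) true).foldl
        (fun acc i =>
          acc ++ (PySem.List.sorted2 ((pvChart l).getD i.1 [])
            (fun x => -x.2) (fun x => x.1)).take 2) []).map (fun a => a.1)
      = (PySem.List.sorted (pvInfo l).items (fun kv => kv.2.1) true).foldl
          (fun acc kv => acc ++ pvOut kv.2) [] := by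
  have hKr : (pvRank l).keys
      = PySem.Set.update ([] : PySem.Set String) (l.map (fun p => p.2.1)) :=
    PySem.Dict.keys_foldl_modify_key l (fun p => p.2.1) 0 (fun _ p => (fun v => v + p.2.2))
      PySem.Dict.empty
  have hKi : (pvInfo l).keys
      = PySem.Set.update ([] : PySem.Set String) (l.map (fun p => p.2.1)) :=
    PySem.Dict.keys_foldl_insert_key l (fun p => p.2.1)
      (fun d p => altVal (d.get? p.2.1) p.1 p.2.2) PySem.Dict.empty
  have hndI : (pvInfo l).keys.Nodup :=
    PySem.Dict.nodup_keys_foldl_insert_key l (fun p => p.2.1)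
      (fun d p => altVal (d.get? p.2.1) p.1 p.2.2) PySem.Dict.empty List.nodup_nil
  have hndR : (pvRank l).keys.Nodup := by rw [hKr, ← hKi]; exact hndI
  have hIr : (pvRank l).items
      = (PySem.Set.update ([] : PySem.Set String) (l.map (fun p => p.2.1))).map
          (fun g => (g, (pvRank l).getD g 0)) := by
    rw [← hKr]; exact PySem.Dict.items_eq_map_keys _ hndR 0
  have hIi : (pvInfo l).items
      = (PySem.Set.update ([] : PySem.Set String) (l.map (fun p => p.2.1))).map
          (fun g => (g, (pvInfo l).getD g pvD0)) := by
    rw [← hKi]; exact PySem.Dict.items_eq_map_keys _ hndI pvD0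
  have hchart : ∀ g, (pvChart l).getD g [] = pvC l g := fun g => by
    have h := getD_pvChartFold l PySem.Dict.empty g
    rw [show (PySem.Dict.empty : PySem.Dict String (List (Int × Int))).getD g [] = [] from rfl,
      List.nil_append] at h
    exact h
  have hinfo : ∀ g, (pvInfo l).get? g = pvVfold (pvF l g) none := fun g =>
    get?_pvVfold l PySem.Dict.empty g
  have hrank : ∀ g, (pvRank l).getD g 0 = ((pvF l g).map (fun p => p.2.2)).sum := fun g => by
    have h := getD_pvRankFold l PySem.Dict.empty g
    rw [show (PySem.Dict.empty : PySem.Dict String Int).getD g 0 = 0 from rfl,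
      zero_add] at h
    exact h
  have hkey : (fun g => (pvRank l).getD g 0) = (fun g => ((pvInfo l).getD g pvD0).1) := by
    funext g
    rw [hrank]
    by_cases hF : pvF l g = []
    · have hnone : (pvInfo l).get? g = none := by rw [hinfo, hF]; rfl
      rw [show (pvInfo l).getD g pvD0 = ((pvInfo l).get? g).getD pvD0 from rfl, hnone, hF]
      rfl
    · obtain ⟨w, hw, h1⟩ := vfold_ne_nil _ hF
      rw [show (pvInfo l).getD g pvD0 = ((pvInfo l).get? g).getD pvD0 from rfl, hinfo, hw,
        Option.getD_some, h1]
  rw [hIr, hIi]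
  rw [sorted_rev_map (fun g => (g, (pvRank l).getD g 0)) (fun x => x.2),
    sorted_rev_map (fun g => (g, (pvInfo l).getD g pvD0)) (fun kv => kv.2.1)]
  simp only []
  rw [hkey]
  rw [List.foldl_map, List.foldl_map]
  simp only []
  rw [PySem.List.foldl_append_eq_flatMap
        (fun g => (PySem.List.sorted2 ((pvChart l).getD g [])
          (fun x => -x.2) (fun x => x.1)).take 2),
      PySem.List.foldl_append_eq_flatMap (fun g => pvOut ((pvInfo l).getD g pvD0))]
  rw [List.nil_append, List.nil_append, List.map_flatMap]
  apply List.flatMap_congr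
  intro g hg
  have hgK : g ∈ l.map (fun p => p.2.1) := by
    have := (PySem.List.mem_sorted _ _ _ g).mp hg
    exact mem_update_nil.mp this
  obtain ⟨p, hpmem, hpg⟩ := List.mem_map.mp hgK
  have hFne : pvF l g ≠ [] := by
    intro h
    have : p ∈ pvF l g := List.mem_filter.mpr ⟨hpmem, by simp [hpg]⟩
    rw [h] at this
    simp at this
  obtain ⟨w, hw, _⟩ := vfold_ne_nil _ hFne
  have hwD : (pvInfo l).getD g pvD0 = w := by
    rw [show (pvInfo l).getD g pvD0 = ((pvInfo l).get? g).getD pvD0 from rfl, hinfo, hw,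
      Option.getD_some]
  have hpw : ((pvF l g).map (fun p => (p.1, p.2.2))).Pairwise (fun a b => a.1 < b.1) :=
    List.pairwise_map.mpr (hpl.filter _)
  rw [hchart, hwD]
  exact per_genre (pvF l g) hFne hpw w hw

-- ===== VERDICT =====
theorem solution_spec : Claim_equal_solution := by
  intro genres plays _
  unfold Spec_solution
  rw [solution_eq, solution_alt_eq]
  exact main_eq (pvL genres plays) (PySem.List.pairwise_lt_enumerate _ _)
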